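-- pv_equiv track=rewrite | github.com/AlexWUrobot/leetcode_python | Minimum Steps to Reduce Array Elements to 0.py | amazon_min_operations
-- ===== SOURCE A (Python) =====
-- def amazon_min_operations(nums):
--     cur_sum = 0
--     count = 0
--
--     for i in range(len(nums) - 1, -1, -1):
--         delta = nums[i] + cur_sum
--         if delta > 0:
--             count += delta
--             cur_sum -= delta
--         elif delta < 0:
--             count += abs(delta)
--             cur_sum += abs(delta)
--
--     return count
-- ===== SOURCE B (Python) =====
-- def amazon_min_operations(nums):
--     return sum(abs(a - b) for a, b in zip(nums, nums[1:] + [0]))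
-- ===== Notes on version B (the rewrite author's own statement) =====
-- stated objective: simpler
-- what changed: Replaced the reverse pass threading a signed cur_sum accumulator with sign-based branching by a one-line forward sum of |nums[i] - nums[i+1]| over adjacent pairs (trailing element paired with 0).
import Mathlib
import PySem

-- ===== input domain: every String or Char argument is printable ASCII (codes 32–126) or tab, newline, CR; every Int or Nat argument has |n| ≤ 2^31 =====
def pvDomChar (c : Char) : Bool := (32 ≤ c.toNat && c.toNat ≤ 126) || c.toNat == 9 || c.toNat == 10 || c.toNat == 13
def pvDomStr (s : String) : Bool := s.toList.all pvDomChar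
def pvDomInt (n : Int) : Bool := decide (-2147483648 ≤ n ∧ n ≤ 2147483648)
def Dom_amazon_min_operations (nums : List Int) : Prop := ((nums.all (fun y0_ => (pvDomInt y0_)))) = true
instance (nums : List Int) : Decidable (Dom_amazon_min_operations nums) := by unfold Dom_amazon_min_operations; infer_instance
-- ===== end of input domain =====

-- B replaces A's reverse pass with a signed cur_sum accumulator by a forward sum of
-- absolute adjacent differences (last element paired with 0): simpler decomposition.

-- ===== PORT A =====
-- loop body of A: state (cur_sum, count), v = nums[i]
def pvStepA (st : Int × Int) (v : Int) : Int × Int :=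
  let delta := v + st.1
  if delta > 0 then (st.1 - delta, st.2 + delta)
  else if delta < 0 then (st.1 + |delta|, st.2 + |delta|)
  else st

def amazon_min_operations (nums : List Int) : Int :=
  ((PySem.List.pyRange ((nums.length : Int) - 1) (-1) (-1)).foldl
    (fun st i => pvStepA st (PySem.List.pyGetD nums i 0)) (0, 0)).2

-- ===== PORT B =====
def amazon_min_operations_alt (nums : List Int) : Int :=
  ((nums.zip (nums.drop 1 ++ [0])).map (fun p => |p.1 - p.2|)).sum

-- ===== PRECONDITION & SPEC =====
def Spec_amazon_min_operations (nums : List Int) (out : Int) : Prop := out = amazon_min_operations_alt nums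
instance (nums : List Int) (out : Int) : Decidable (Spec_amazon_min_operations nums out) := by unfold Spec_amazon_min_operations; infer_instance

-- ===== CLAIM (what is proved, stated in full; the proofs are below) =====
def Claim_equal_amazon_min_operations : Prop := ∀ (nums : List Int), Dom_amazon_min_operations nums → Spec_amazon_min_operations nums (amazon_min_operations nums)

-- ===== LEMMAS AND PROOFS =====

-- spine of A's backward pass: pvS l c sums |x + c| threading c := -x
def pvS : List Int → Int → Int
  | [], _ => 0
  | x :: t, c => |x + c| + pvS t (-x)

theorem pvStepA_eq (st : Int × Int) (v : Int) :
    pvStepA st v = (-v, st.2 + |v + st.1|) := by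
  unfold pvStepA
  rcases st with ⟨c, cnt⟩
  simp only
  split_ifs with h1 h2
  · rw [abs_of_pos h1]; simp
  · rw [abs_of_neg h2]; simp
  · have h0 : v + c = 0 := by omega
    simp [Prod.ext_iff, h0]; omega

theorem pvFold (l : List Int) (c cnt : Int) :
    (l.foldl pvStepA (c, cnt)).2 = cnt + pvS l c := by
  induction l generalizing c cnt with
  | nil => simp [pvS]
  | cons x t ih =>
    simp only [List.foldl_cons, pvStepA_eq, pvS, ih]
    ring

theorem pvS_append (xs : List Int) (x c : Int) :
    pvS (xs ++ [x]) c = pvS xs c + |x - xs.getLastD (-c)| := by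
  induction xs generalizing c with
  | nil => simp [pvS]
  | cons y t ih =>
    simp only [List.cons_append, pvS, ih, List.getLastD_cons, neg_neg]
    ring

theorem getLastD_reverse_headD (l : List Int) (d : Int) :
    l.reverse.getLastD d = l.headD d := by
  cases l with
  | nil => rfl
  | cons x t => simp

theorem alt_eq_pvS (nums : List Int) :
    amazon_min_operations_alt nums = pvS nums.reverse 0 := by
  induction nums with
  | nil => simp [amazon_min_operations_alt, pvS]
  | cons y ys ih =>
    have halt : amazon_min_operations_alt (y :: ys)
        = |y - ys.headD 0| + amazon_min_operations_alt ys := by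
      cases ys with
      | nil => simp [amazon_min_operations_alt]
      | cons z t => simp [amazon_min_operations_alt]
    rw [halt, List.reverse_cons, pvS_append, ← ih,
        getLastD_reverse_headD]
    ring

theorem fold_eq (nums : List Int) :
    amazon_min_operations nums = pvS nums.reverse 0 := by
  unfold amazon_min_operations
  rw [PySem.List.pyRange_neg_one_eq_reverse]
  have h1 : (-1 : Int) + 1 = 0 := by norm_num
  have h2 : (nums.length : Int) - 1 + 1 = (nums.length : Int) := by ring
  rw [h1, h2]
  have hmap : (PySem.List.pyRange 0 (nums.length : Int) 1).map
      (fun i => PySem.List.pyGetD nums i 0) = nums :=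
    PySem.List.map_pyGetD_pyRange_zero' nums 0
  calc ((PySem.List.pyRange 0 (nums.length : Int) 1).reverse.foldl
          (fun st i => pvStepA st (PySem.List.pyGetD nums i 0)) (0, 0)).2
      = (((PySem.List.pyRange 0 (nums.length : Int) 1).reverse.map
          (fun i => PySem.List.pyGetD nums i 0)).foldl pvStepA (0, 0)).2 := by
        rw [List.foldl_map]
    _ = (nums.reverse.foldl pvStepA (0, 0)).2 := by
        rw [List.map_reverse, hmap]
    _ = pvS nums.reverse 0 := by rw [pvFold]; ring

-- ===== VERDICT (by name: the statement is the Claim_ definition above) =====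
theorem amazon_min_operations_spec : Claim_equal_amazon_min_operations := by
  intro nums _
  unfold Spec_amazon_min_operations
  rw [fold_eq, alt_eq_pvS]
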